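-- pv_equiv track=rewrite | github.com/rhseung/ec2206 | assignment3/q2.py | WaveSorting
-- ===== SOURCE A (Python) =====
-- def WaveSorting(arr: list[int]) -> bool:
--     """
--     >>> WaveSorting([0, 1, 2, 4, 1, 4])
--     True
--     >>> WaveSorting([0, 1, 2, 4, 1, 1, 1])
--     False
--     >>> WaveSorting([0, 4, 22, 4, 14, 4, 2])
--     True
--     >>> WaveSorting([1, 1, 1])
--     False
--     >>> WaveSorting([0, 67])
--     True
--     >>> WaveSorting([0, 1, 2, 3, 3, 3, 3, 3, 8, 9])
--     True
--     >>> WaveSorting([10, 90, 49, 2, 1, 5, 23])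
--     True
--     >>> WaveSorting([10, 90, 49, 2, 1, 5, 23, 45, 21, 22])
--     True
--     >>> WaveSorting([1, 1, 1, 1, 5, 2, 5, 1, 1, 3, 5, 6, 8, 3])
--     True
--     >>> WaveSorting([10, 100, 20, 300])
--     True
--     """
--
--     # 배열의 길이를 n이라고 할 때 [a_1, a_2, a_3, ..., a_n]을 오름차순 정렬했을 때 [L_1, L_2, ..., L_{n/2}, H_1, H_2, ..., H_{n/2}]이라 하자. (홀짝 무시)
--     # 이러면, H_1 > L_1 < H_2 > L_2 < H_3 > ... < H_{n/2 - 1} > L_{n/2 - 1} < H_{n/2} > L_{n/2} (< H_{n/2 + 1}) 으로 항상 wave sort할 수 있음. (n이 홀수인 경우, H가 1개 더 많아도 됨)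
--     # 여기서 불가능한 경우는 임의의 자연수 i에 대해 H_i <= L_i일 경우 wave sort가 불가능함.
--
--     arr.sort()
--     n = len(arr)
--     m = n // 2
--
--     for i in range(n - m):
--         if arr[i] >= arr[i + m]:
--             return False
--
--     return True
-- ===== SOURCE B (Python) =====
-- def WaveSorting(arr: list[int]) -> bool:
--     counts = {}
--     for x in arr:
--         counts[x] = counts.get(x, 0) + 1
--     half = len(arr) // 2
--     return all(c <= half for c in counts.values())
-- ===== Notes on version B (the rewrite author's own statement) =====
-- stated objective: alternative
-- what changed: Replaces sort-then-window-compare with a single frequency-counting pass: wave sorting is possible iff no value occurs more than len(arr)//2 times.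
import Mathlib
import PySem

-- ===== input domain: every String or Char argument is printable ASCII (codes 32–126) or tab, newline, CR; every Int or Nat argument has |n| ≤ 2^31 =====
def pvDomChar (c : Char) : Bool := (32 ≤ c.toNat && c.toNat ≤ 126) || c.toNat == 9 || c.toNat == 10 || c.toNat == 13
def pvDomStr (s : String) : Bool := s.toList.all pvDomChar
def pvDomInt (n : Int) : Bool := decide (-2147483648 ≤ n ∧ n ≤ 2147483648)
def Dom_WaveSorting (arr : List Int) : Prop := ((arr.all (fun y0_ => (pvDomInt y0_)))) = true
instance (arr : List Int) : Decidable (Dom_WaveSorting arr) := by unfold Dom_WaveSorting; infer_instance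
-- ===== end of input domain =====

-- B replaces sort-then-window-compare by one frequency-counting pass (wave order exists iff no
-- value fills more than half the array); A sorts its argument in place in Python, B does not
-- mutate — the equivalence proved here is about the return value.

-- ===== PORT A =====
-- arr.sort(); n = len(arr); m = n // 2; for i in range(n - m): if arr[i] >= arr[i + m]: return False; return True
def WaveSorting (arr : List Int) : Bool :=
  let s := PySem.List.sorted arr (fun x => x) false
  let n : Int := s.length
  let m : Int := PySem.Int.floordiv n 2
  (PySem.List.pyRange 0 (n - m) 1).all fun i =>
    !(decide (PySem.List.pyGetD s i 0 ≥ PySem.List.pyGetD s (i + m) 0))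

-- ===== PORT B =====
-- counts = {}; for x in arr: counts[x] = counts.get(x, 0) + 1; return all(c <= len(arr)//2 for c in counts.values())
def WaveSorting_alt (arr : List Int) : Bool :=
  let counts := arr.foldl (fun d x => d.insert x (d.getD x 0 + 1)) (PySem.Dict.empty)
  let half : Int := PySem.Int.floordiv (arr.length : Int) 2
  counts.values.all fun c => decide (c ≤ half)

-- ===== PRECONDITION & SPEC =====
def Spec_WaveSorting (arr : List Int) (out : Bool) : Prop := out = WaveSorting_alt arr
instance (arr : List Int) (out : Bool) : Decidable (Spec_WaveSorting arr out) := by unfold Spec_WaveSorting; infer_instance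

-- ===== CLAIM (what is proved, stated in full; the proofs are below) =====
def Claim_equal_WaveSorting : Prop := ∀ (arr : List Int), Dom_WaveSorting arr → Spec_WaveSorting arr (WaveSorting arr)

-- ===== LEMMAS AND PROOFS =====

-- If the window test fails at i in a (≤-pairwise) sorted list, the value s[i] fills the window: count > m.
lemma count_gt_of_window_fail (s : List Int) (hs : s.Pairwise (· ≤ ·)) (m i : Nat)
    (him : i + m < s.length) (hge : s[i + m]'him ≤ s[i]'(by omega)) :
    m + 1 ≤ s.count (s[i]'(by omega)) := by
  have hmono : ∀ p q : Nat, (hq : q < s.length) → (hpq : p ≤ q) → s[p]'(by omega) ≤ s[q]'hq := by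
    intro p q hq hpq
    rcases Nat.lt_or_ge p q with h | h
    · exact (List.pairwise_iff_getElem.mp hs) p q (by omega) hq h
    · have : p = q := by omega
      subst this; rfl
  have hwin : ∀ k : Nat, (hk : k ≤ m) → s[i + k]'(by omega) = s[i]'(by omega) := by
    intro k hk
    have h1 := hmono i (i + k) (by omega) (by omega)
    have h2 := hmono (i + k) (i + m) (by omega) (by omega)
    omega
  set x := s[i]'(by omega) with hx
  have hlen : ((s.drop i).take (m + 1)).length = m + 1 := by
    simp [List.length_take, List.length_drop]; omega
  have hall : ∀ b ∈ (s.drop i).take (m + 1), x = b := by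
    intro b hb
    obtain ⟨k, hk, hbk⟩ := List.mem_iff_getElem.mp hb
    rw [hlen] at hk
    have : ((s.drop i).take (m+1))[k]'(by omega) = s[i + k]'(by omega) := by
      rw [List.getElem_take, List.getElem_drop]
    rw [this, hwin k (by omega)] at hbk
    exact hbk
  have hseg := List.count_eq_length.mpr hall
  rw [hlen] at hseg
  calc m + 1 = ((s.drop i).take (m + 1)).count x := hseg.symm
    _ ≤ s.count x := ((List.take_sublist _ _).trans (List.drop_sublist _ _)).count_le _

-- Conversely, a value occurring more than m times in a sorted list yields a failing window.
lemma window_fail_of_count_gt (s : List Int) (hs : s.Pairwise (· ≤ ·)) (m : Nat) (x : Int)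
    (hc : m + 1 ≤ s.count x) :
    ∃ (i : Nat) (h : i + m < s.length), s[i + m]'h ≤ s[i]'(by omega) ∧ s[i]'(by omega) = x := by
  classical
  set A := s.filter (fun y => decide (y < x)) with hA
  set B := s.filter (fun y => y == x) with hB
  set C := s.filter (fun y => decide (x < y)) with hC
  have e1 : (s.filter (fun y => !decide (y < x))).filter (fun y => y == x) = B := by
    rw [List.filter_filter]
    apply List.filter_congr
    intro y _
    by_cases h : y = x
    · subst h; simp
    · simp [h]
  have e2 : (s.filter (fun y => !decide (y < x))).filter (fun y => !(y == x)) = C := by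
    rw [List.filter_filter]
    apply List.filter_congr
    intro y _
    by_cases h : y = x
    · subst h; simp
    · by_cases h2 : y < x
      · have h3 : ¬ x < y := by omega
        simp [h2, h3]
      · have h3 : x < y := by omega
        simp [h, h2, h3]
  have hperm : (A ++ (B ++ C)).Perm s := by
    have h1 := List.filter_append_perm (fun y => decide (y < x)) s
    have h2 := List.filter_append_perm (fun y => y == x) (s.filter (fun y => !decide (y < x)))
    rw [e1, e2] at h2
    exact (List.Perm.append_left A h2).trans h1
  have hmemA : ∀ y ∈ A, y < x := by intro y hy; simpa using (List.mem_filter.mp hy).2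
  have hmemB : ∀ y ∈ B, y = x := by
    intro y hy; exact eq_of_beq (List.mem_filter.mp hy).2
  have hmemC : ∀ y ∈ C, x < y := by intro y hy; simpa using (List.mem_filter.mp hy).2
  have hsorted : (A ++ (B ++ C)).Pairwise (· ≤ ·) := by
    rw [List.pairwise_append]
    refine ⟨List.Pairwise.sublist List.filter_sublist hs, ?_, ?_⟩
    · rw [List.pairwise_append]
      refine ⟨List.Pairwise.sublist List.filter_sublist hs,
        List.Pairwise.sublist List.filter_sublist hs, ?_⟩
      intro a ha b hb
      have := hmemB a ha; have := hmemC b hb; omega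
    · intro a ha b hb
      have h1 := hmemA a ha
      rcases List.mem_append.mp hb with h | h
      · have := hmemB b h; omega
      · have := hmemC b h; omega
  have heq : s = A ++ (B ++ C) :=
    (List.Perm.eq_of_pairwise (fun a b _ _ h1 h2 => le_antisymm h1 h2) hsorted hs hperm).symm
  have hBlen : B.length = s.count x := by
    rw [hB, List.count_eq_length_filter]
  have hlen : s.length = A.length + (B.length + C.length) := by
    rw [heq]; simp
  have g2 : s[A.length]'(by omega) = B[0]'(by omega) := by
    rw [List.getElem_of_eq heq]
    rw [List.getElem_append_right (by omega)]
    rw [List.getElem_append_left (by omega)]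
    congr 1; omega
  have g1 : s[A.length + m]'(by omega) = B[m]'(by omega) := by
    rw [List.getElem_of_eq heq]
    rw [List.getElem_append_right (by omega)]
    rw [List.getElem_append_left (by omega)]
    congr 1; omega
  refine ⟨A.length, by omega, ?_, ?_⟩
  · rw [g1, g2, hmemB _ (List.getElem_mem _), hmemB _ (List.getElem_mem _)]
  · rw [g2, hmemB _ (List.getElem_mem _)]

-- ===== VERDICT (by name: the statement is the Claim_ definition above) =====
theorem WaveSorting_spec : Claim_equal_WaveSorting := by
  intro arr _
  unfold Spec_WaveSorting
  have hlen : (PySem.List.sorted arr (fun x => x) false).length = arr.length :=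
    PySem.List.length_sorted arr (fun x => x) false
  have hpair : (PySem.List.sorted arr (fun x => x) false).Pairwise (· ≤ ·) := by
    simpa using PySem.List.sorted_pairwise arr (fun x => x)
  have hcnt : ∀ x : Int, (PySem.List.sorted arr (fun x => x) false).count x = arr.count x :=
    fun x => (PySem.List.sorted_perm arr (fun x => x) false).count_eq x
  have hm : PySem.Int.floordiv ((PySem.List.sorted arr (fun x => x) false).length : Int) 2
      = ((arr.length / 2 : Nat) : Int) := by
    rw [hlen]; exact_mod_cast PySem.Int.floordiv_natCast arr.length 2
  have hm2 : PySem.Int.floordiv ((arr.length : Int)) 2 = ((arr.length / 2 : Nat) : Int) := by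
    exact_mod_cast PySem.Int.floordiv_natCast arr.length 2
  rw [Bool.eq_iff_iff]
  simp only [WaveSorting, WaveSorting_alt, PySem.Dict.foldl_insert_getD_add_one_eq_counter]
  rw [PySem.Dict.values_eq_map_keys _ (PySem.Dict.nodup_keys_counter arr) 0]
  rw [List.all_eq_true, List.all_eq_true]
  constructor
  · -- window test passes ⇒ every count is at most n//2
    intro hA c hc
    rw [List.mem_map] at hc
    obtain ⟨x, hx, rfl⟩ := hc
    rw [PySem.Dict.getD_counter, hm2]
    rw [decide_eq_true_iff, Nat.cast_le]
    by_contra hgt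
    push Not at hgt
    have hc' : arr.length / 2 + 1 ≤ (PySem.List.sorted arr (fun x => x) false).count x := by
      rw [hcnt]; omega
    obtain ⟨i, h, hle, hval⟩ :=
      window_fail_of_count_gt _ hpair (arr.length / 2) x hc'
    have hmem : (i : Int) ∈ PySem.List.pyRange 0
        (((PySem.List.sorted arr (fun x => x) false).length : Int)
          - PySem.Int.floordiv ((PySem.List.sorted arr (fun x => x) false).length : Int) 2) 1 := by
      rw [PySem.List.mem_pyRange_one, hm]
      constructor
      · positivity
      · push_cast; omega
    have hidx : ((i : Int) + PySem.Int.floordiv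
        ((PySem.List.sorted arr (fun x => x) false).length : Int) 2)
        = ((i + arr.length / 2 : Nat) : Int) := by
      rw [hm]; push_cast; ring
    have := hA (i : Int) hmem
    rw [hidx, PySem.List.pyGetD_natCast, PySem.List.pyGetD_natCast,
      List.getD_eq_getElem _ _ (by omega), List.getD_eq_getElem _ _ h] at this
    simp only [ge_iff_le, Bool.not_eq_true', decide_eq_false_iff_not, not_le] at this
    omega
  · -- every count at most n//2 ⇒ window test passes
    intro hB i hi
    rw [PySem.List.mem_pyRange_one] at hi
    obtain ⟨k, rfl⟩ : ∃ k : Nat, i = (k : Int) := ⟨i.toNat, (Int.toNat_of_nonneg hi.1).symm⟩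
    have hk : k + arr.length / 2 < (PySem.List.sorted arr (fun x => x) false).length := by
      have := hi.2
      rw [hm] at this
      push_cast at this
      omega
    have hidx : ((k : Int) + PySem.Int.floordiv
        ((PySem.List.sorted arr (fun x => x) false).length : Int) 2)
        = ((k + arr.length / 2 : Nat) : Int) := by
      rw [hm]; push_cast; ring
    rw [hidx, PySem.List.pyGetD_natCast, PySem.List.pyGetD_natCast,
      List.getD_eq_getElem _ _ (by omega), List.getD_eq_getElem _ _ hk]
    simp only [ge_iff_le, Bool.not_eq_true', decide_eq_false_iff_not, not_le]
    by_contra hge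
    push Not at hge
    have hcg := count_gt_of_window_fail _ hpair (arr.length / 2) k hk hge
    set x := (PySem.List.sorted arr (fun x => x) false)[k]'(by omega) with hxdef
    have hxarr : x ∈ arr := by
      have : x ∈ (PySem.List.sorted arr (fun x => x) false) := List.getElem_mem _
      exact ((PySem.List.sorted_perm arr (fun x => x) false).mem_iff).mp this
    have hmem : ((PySem.Dict.counter arr).getD x 0) ∈
        (PySem.Dict.counter arr).keys.map (fun k => (PySem.Dict.counter arr).getD k 0) := by
      refine List.mem_map.mpr ⟨x, ?_, rfl⟩
      rw [PySem.Dict.keys_counter, PySem.Set.mem_ofList]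
      exact hxarr
    have := hB _ hmem
    rw [PySem.Dict.getD_counter, hm2, decide_eq_true_iff, Nat.cast_le] at this
    rw [hcnt] at hcg
    omega
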